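-- pv_equiv track=rewrite | github.com/epsilonkn/EasyDoc | easydoc/core/FileParser.py | get_function_declaration
-- ===== SOURCE A (Python) =====
-- def get_function_declaration(lines : list[str]) -> tuple[str, int]:
--     """Extract a function declaration block from source lines.
--
--     This method returns the full function header and the number of lines consumed.
--
--     Args:
--         lines (list[str]): The lines beginning at the function declaration.
--
--     Returns:
--         tuple[str, int]: The function declaration string and the number of lines consumed.
--     """
--     decla = ""
--     pointer = 0
--
--     opened = lines[pointer].count("(") - lines[pointer].count(")")
--     decla = lines[0]
--     while opened != 0 and pointer < len(lines):
--         pointer += 1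
--         opened += lines[pointer].count("(") - lines[pointer].count(")")
--         decla += lines[pointer]
--     if opened == 0:
--         return decla, pointer + 1
--     if not opened and pointer >= len(lines):
--         raise IndexError(f"a parenthesis was opened but never closed on line \n {lines[0]}\nFailed to parse the module")
-- ===== SOURCE B (Python) =====
-- def get_function_declaration(lines: list[str]) -> tuple[str, int]:
--     """Extract a function declaration block from source lines.
--
--     Table-driven rewrite: build the cumulative parenthesis-balance table in one
--     pass, locate the first index where the balance returns to zero, and join
--     exactly that prefix of lines.
--     """
--     balances = []
--     total = 0
--     for line in lines:
--         total += line.count("(") - line.count(")")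
--         balances.append(total)
--     try:
--         n = balances.index(0) + 1
--     except ValueError:
--         raise IndexError(
--             "a parenthesis was opened but never closed\nFailed to parse the module"
--         )
--     return "".join(lines[:n]), n
-- ===== Notes on version B (the rewrite author's own statement) =====
-- stated objective: alternative
-- what changed: Replaces A's incremental while-loop (indexing lines and growing the header string line by line) with a two-phase table computation: build the cumulative parenthesis-balance list, find the first zero with list.index, and join that prefix once.
import Mathlib
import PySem

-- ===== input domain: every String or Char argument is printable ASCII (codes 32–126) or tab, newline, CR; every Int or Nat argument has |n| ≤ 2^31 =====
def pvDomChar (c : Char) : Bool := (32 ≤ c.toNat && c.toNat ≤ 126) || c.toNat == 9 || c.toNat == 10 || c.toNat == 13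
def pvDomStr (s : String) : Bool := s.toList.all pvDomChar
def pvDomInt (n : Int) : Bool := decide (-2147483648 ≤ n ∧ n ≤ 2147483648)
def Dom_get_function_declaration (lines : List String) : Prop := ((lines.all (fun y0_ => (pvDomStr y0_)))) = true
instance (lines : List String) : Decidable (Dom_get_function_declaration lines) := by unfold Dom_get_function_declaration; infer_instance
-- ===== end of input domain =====

-- B replaces A's incremental while-loop by a cumulative-balance table scanned for its first zero
-- (alternative decomposition, same cost); A = B proved on Pre_, exactly the inputs where A returns.


-- ===== PORT A =====
-- line.count("(") - line.count(")")  (this expression appears verbatim in both Pythons)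
def pvDelta (s : String) : Int :=
  (PySem.Str.count s "(" : Int) - (PySem.Str.count s ")" : Int)

-- A's while-loop; decla is kept as List Char (Python string concatenation, exact on code points);
-- fuel = lines.length bounds the iterations (pointer strictly increases and stays below it).
-- pyGet? = none is Python's IndexError: the junk value ([], 0) occurs only outside Pre_.
def pvALoop (lines : List String) : Nat → Nat → Int → List Char → List Char × Int
  | 0, pointer, _, decla => (decla, (pointer : Int) + 1)
  | fuel + 1, pointer, opened, decla =>
    if opened ≠ 0 ∧ (pointer : Int) < (lines.length : Int) then
      match PySem.List.pyGet? lines ((pointer + 1 : Nat) : Int) with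
      | none => ([], 0)
      | some line =>
          pvALoop lines fuel (pointer + 1) (opened + pvDelta line) (decla ++ line.toList)
    else
      if opened = 0 then (decla, (pointer : Int) + 1) else ([], 0)

def get_function_declaration (lines : List String) : String × Int :=
  match PySem.List.pyGet? lines 0 with
  | none => ("", 0)   -- lines[0] on empty input: IndexError, outside Pre_
  | some first =>
      let opened := pvDelta first
      let r := pvALoop lines lines.length 0 opened first.toList
      (String.ofList r.1, r.2)

-- ===== PORT B =====
-- phase 1: the cumulative-balance table; phase 2: first zero via .index; phase 3: join the prefix.
def get_function_declaration_alt (lines : List String) : String × Int :=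
  match PySem.List.index? ((lines.foldl
    (fun (st : List Int × Int) line =>
      (st.1 ++ [st.2 + pvDelta line], st.2 + pvDelta line)) ([], 0)).1) 0 with
  | none => ("", 0)   -- balances.index(0) raises, re-raised as IndexError: outside Pre_
  | some i =>
      (PySem.Str.join "" (PySem.List.slice lines none (some ((i : Int) + 1))), (i : Int) + 1)

-- ===== PRECONDITION & SPEC =====
-- Pre_ = exactly the inputs where A returns: some prefix of lines has total parenthesis balance 0
-- (on the rest — empty input or a never-closed parenthesis — A raises IndexError, and so does B).
def Pre_get_function_declaration (lines : List String) : Prop :=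
  ∃ i ∈ List.range lines.length, ((lines.take (i + 1)).map pvDelta).sum = 0
instance (lines : List String) : Decidable (Pre_get_function_declaration lines) := by
  unfold Pre_get_function_declaration; infer_instance

def pvWitness_get_function_declaration : List String := ["def f(", "x) :"]

def Spec_get_function_declaration (lines : List String) (out : String × Int) : Prop := out = get_function_declaration_alt lines
instance (lines : List String) (out : String × Int) : Decidable (Spec_get_function_declaration lines out) := by unfold Spec_get_function_declaration; infer_instance

-- ===== CLAIM (what is proved, stated in full; the proofs are below) =====
def Claim_equal_get_function_declaration : Prop := ∀ (lines : List String), Dom_get_function_declaration lines → Pre_get_function_declaration lines → Spec_get_function_declaration lines (get_function_declaration lines)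

-- ===== LEMMAS AND PROOFS =====

-- prefix balance: S k = sum of the first k per-line deltas
def pvS (lines : List String) (k : Nat) : Int := ((lines.take k).map pvDelta).sum

theorem pvS_zero (lines : List String) : pvS lines 0 = 0 := rfl

theorem pvS_succ_getElem (lines : List String) (k : Nat) (hk : k < lines.length) :
    pvS lines (k + 1) = pvS lines k + pvDelta lines[k] := by
  unfold pvS
  rw [List.take_add_one]
  simp [hk]

-- "".join(parts) is the flat concatenation of the parts' characters
theorem pvJoin_empty (parts : List String) :
    PySem.Str.join "" parts = String.ofList ((parts.map String.toList).flatten) := by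
  have hj : ∀ css : List (List Char), PySem.Chars.join [] css = css.flatten := by
    intro css
    induction css with
    | nil => simp [PySem.Chars.join_nil]
    | cons c cs ih =>
        cases cs with
        | nil => simp [PySem.Chars.join_singleton]
        | cons d ds => rw [PySem.Chars.join_cons_cons]; simp_all
  have h : (PySem.Str.join "" parts).toList = (parts.map String.toList).flatten := by
    simp [PySem.Str.toList_join]
    exact hj _
  rw [← h, String.ofList_toList]

-- B's balance table is pvS mapped over 1..n
theorem pvBal_eq (ls : List String) (acc : List Int) (t : Int) :
    (ls.foldl (fun (st : List Int × Int) line =>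
        (st.1 ++ [st.2 + pvDelta line], st.2 + pvDelta line)) (acc, t)).1
      = acc ++ (List.range ls.length).map (fun k => t + pvS ls (k + 1)) := by
  induction ls generalizing acc t with
  | nil => simp
  | cons l ls ih =>
      rw [List.foldl_cons, ih]
      simp only [List.length_cons, List.range_succ_eq_map, List.map_cons, List.map_map]
      simp [pvS, Function.comp_def, List.take_succ_cons, add_assoc,
        List.append_assoc]

-- first-zero characterisation of list.index
theorem pvIndex?_first_zero (xs : List Int) (k : Nat) (hk : k < xs.length)
    (h0 : xs[k] = 0) (hmin : ∀ j (hj : j < k), xs[j]'(by omega) ≠ 0) :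
    PySem.List.index? xs 0 = some k := by
  rw [PySem.List.index?_eq_some_iff]
  refine ⟨xs.take k, xs.drop (k + 1), ?_, by simp [hk.le], ?_⟩
  · conv_lhs => rw [← List.take_append_drop k xs]
    rw [List.drop_eq_getElem_cons hk, h0]
  · intro hmem
    obtain ⟨j, hj, hje⟩ := List.mem_iff_getElem.mp hmem
    have hjk : j < k := by simp at hj; omega
    exact hmin j hjk (by simpa [List.getElem_take] using hje)

-- the while-loop consumes lines up to the first prefix (≥ its entry pointer) of balance 0
theorem pvALoop_eq (lines : List String) :
    ∀ (fuel p i₀ : Nat) (decla : List Char),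
      i₀ < lines.length → p ≤ i₀ → i₀ - p ≤ fuel →
      pvS lines (i₀ + 1) = 0 → (∀ j, p ≤ j → j < i₀ → pvS lines (j + 1) ≠ 0) →
      pvALoop lines fuel p (pvS lines (p + 1)) decla
        = (decla ++ (((lines.drop (p + 1)).take (i₀ - p)).map String.toList).flatten,
           (i₀ : Int) + 1) := by
  intro fuel
  induction fuel with
  | zero =>
      intro p i₀ decla hi hpi hf hz _
      have hip : i₀ = p := by omega
      subst hip
      simp [pvALoop]
  | succ fuel ih =>
      intro p i₀ decla hi hpi hf hz hmin
      by_cases h0 : pvS lines (p + 1) = 0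
      · have hip : i₀ = p := by
          by_contra hne
          exact hmin p le_rfl (by omega) h0
        subst hip
        simp [pvALoop, h0]
      · have hplt : p < i₀ := by
          rcases Nat.eq_or_lt_of_le hpi with h | h
          · exfalso; apply h0; rw [h]; exact hz
          · exact h
        have hp1 : p + 1 < lines.length := by omega
        have hget : PySem.List.pyGet? lines ((p + 1 : Nat) : Int) = some lines[p + 1] := by
          have h1 : (0 : Int) ≤ (p : Int) + 1 := by omega
          have h2 : ((p : Int) + 1) < (lines.length : Int) := by exact_mod_cast hp1
          simp [PySem.List.pyGet?, PySem.List.pyIdx?, h1, h2, hp1]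
        rw [pvALoop]
        rw [if_pos ⟨h0, by exact_mod_cast (by omega : p < lines.length)⟩, hget]
        show pvALoop lines fuel (p + 1) (pvS lines (p + 1) + pvDelta lines[p + 1])
              (decla ++ lines[p + 1].toList)
            = (decla ++ (((lines.drop (p + 1)).take (i₀ - p)).map String.toList).flatten,
               (i₀ : Int) + 1)
        rw [← pvS_succ_getElem lines (p + 1) hp1]
        rw [ih (p + 1) i₀ _ hi (by omega) (by omega) hz
          (fun j h1 h2 => hmin j (by omega) h2)]
        rw [List.drop_eq_getElem_cons hp1]
        have htk : (lines[p + 1] :: lines.drop (p + 1 + 1)).take (i₀ - p)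
            = lines[p + 1] :: (lines.drop (p + 1 + 1)).take (i₀ - (p + 1)) := by
          rw [show i₀ - p = (i₀ - (p + 1)) + 1 from by omega, List.take_succ_cons]
        rw [htk]
        simp

-- ===== VERDICT (by name: the statement is the Claim_ definition above) =====
theorem get_function_declaration_spec : Claim_equal_get_function_declaration := by
  intro lines _hdom hpre
  unfold Spec_get_function_declaration
  have hex : ∃ i, pvS lines (i + 1) = 0 ∧ i < lines.length := by
    obtain ⟨i, hi, hs⟩ := hpre
    exact ⟨i, hs, by simpa using hi⟩
  obtain ⟨hz, hlt⟩ := Nat.find_spec hex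
  set i₀ := Nat.find hex with hi₀def
  have hmin : ∀ j, j < i₀ → pvS lines (j + 1) ≠ 0 := by
    intro j hj hsj
    exact Nat.find_min hex hj ⟨hsj, by omega⟩
  have h0lt : 0 < lines.length := by omega
  have hcons : lines.take (i₀ + 1) = lines[0] :: (lines.drop 1).take i₀ := by
    obtain ⟨x, xs, hx⟩ : ∃ x xs, lines = x :: xs := by
      cases lines with
      | nil => simp at h0lt
      | cons a as => exact ⟨a, as, rfl⟩
    subst hx; simp
  -- A's side
  have hget0 : PySem.List.pyGet? lines 0 = some lines[0] := by
    rw [show (0 : Int) = ((0 : Nat) : Int) from rfl]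
    simp [PySem.List.pyGet?, PySem.List.pyIdx?, h0lt]
  have hA : get_function_declaration lines
      = (String.ofList (((lines.take (i₀ + 1)).map String.toList).flatten), (i₀ : Int) + 1) := by
    unfold get_function_declaration
    rw [hget0]
    show (String.ofList (pvALoop lines lines.length 0 (pvDelta lines[0]) lines[0].toList).1,
          (pvALoop lines lines.length 0 (pvDelta lines[0]) lines[0].toList).2)
        = (String.ofList (((lines.take (i₀ + 1)).map String.toList).flatten), (i₀ : Int) + 1)
    have hS1 : pvDelta lines[0] = pvS lines (0 + 1) := by
      rw [pvS_succ_getElem lines 0 h0lt, pvS_zero, zero_add]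
    rw [hS1, pvALoop_eq lines lines.length 0 i₀ lines[0].toList hlt (Nat.zero_le _)
      (by omega) hz (fun j _ hj => hmin j hj)]
    rw [hcons]
    simp
  -- B's side
  have hbal : (lines.foldl
      (fun (st : List Int × Int) line =>
        (st.1 ++ [st.2 + pvDelta line], st.2 + pvDelta line)) ([], 0)).1
      = (List.range lines.length).map (fun k => pvS lines (k + 1)) := by
    rw [pvBal_eq]
    simp
  have hidx : PySem.List.index?
      ((List.range lines.length).map (fun k => pvS lines (k + 1))) 0 = some i₀ := by
    have hk' : i₀ < ((List.range lines.length).map (fun k => pvS lines (k + 1))).length := by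
      simpa using hlt
    refine pvIndex?_first_zero _ i₀ hk' (by rw [List.getElem_map, List.getElem_range]; exact hz) ?_
    intro j hj
    rw [List.getElem_map, List.getElem_range]
    exact hmin j hj
  have hB : get_function_declaration_alt lines
      = (String.ofList (((lines.take (i₀ + 1)).map String.toList).flatten), (i₀ : Int) + 1) := by
    unfold get_function_declaration_alt
    rw [hbal, hidx]
    show (PySem.Str.join "" (PySem.List.slice lines none (some ((i₀ : Int) + 1))), (i₀ : Int) + 1)
        = (String.ofList (((lines.take (i₀ + 1)).map String.toList).flatten), (i₀ : Int) + 1)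
    have hsl : PySem.List.slice lines none (some ((i₀ : Int) + 1)) = lines.take (i₀ + 1) := by
      rw [show ((i₀ : Int) + 1) = ((i₀ + 1 : Nat) : Int) from by push_cast; ring,
        PySem.List.slice_to_natCast]
    rw [hsl, pvJoin_empty]
  rw [hA, hB]
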